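-- pv_equiv track=rewrite | github.com/HelmholtzAI-Consultants-Munich/wtd_solver | main.py | _count_single_event_tracks_after_lunch
-- ===== SOURCE A (Python) =====
-- def _count_single_event_tracks_after_lunch(
--     scheduled_events: list[dict[str, object]],
--     lunch_end_abs: int,
-- ) -> int:
--     events_by_track: dict[int, list[dict[str, object]]] = {}
--     for event in scheduled_events:
--         events_by_track.setdefault(int(event["track"]), []).append(event)
--
--     return sum(
--         1
--         for track_events in events_by_track.values()
--         if len(track_events) == 1 and int(track_events[0]["start_min"]) >= lunch_end_abs
--     )
-- ===== SOURCE B (Python) =====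
-- def _count_single_event_tracks_after_lunch(
--     scheduled_events: list[dict[str, object]],
--     lunch_end_abs: int,
-- ) -> int:
--     # Partition refinement: repeatedly peel off all events of the first
--     # remaining track; no dictionary is ever built.
--     pairs = [(int(e["track"]), e) for e in scheduled_events]
--     total = 0
--     while pairs:
--         t0 = pairs[0][0]
--         same = [e for t, e in pairs if t == t0]
--         if len(same) == 1 and int(same[0]["start_min"]) >= lunch_end_abs:
--             total += 1
--         pairs = [p for p in pairs if p[0] != t0]
--     return total
-- ===== Notes on version B (the rewrite author's own statement) =====
-- stated objective: alternative
-- what changed: B uses partition refinement instead of hashing: it builds no dictionary at all, but repeatedly peels off all events sharing the first remaining track from a (track, event) work list, testing each peeled group for being a qualifying singleton.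
import Mathlib
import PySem

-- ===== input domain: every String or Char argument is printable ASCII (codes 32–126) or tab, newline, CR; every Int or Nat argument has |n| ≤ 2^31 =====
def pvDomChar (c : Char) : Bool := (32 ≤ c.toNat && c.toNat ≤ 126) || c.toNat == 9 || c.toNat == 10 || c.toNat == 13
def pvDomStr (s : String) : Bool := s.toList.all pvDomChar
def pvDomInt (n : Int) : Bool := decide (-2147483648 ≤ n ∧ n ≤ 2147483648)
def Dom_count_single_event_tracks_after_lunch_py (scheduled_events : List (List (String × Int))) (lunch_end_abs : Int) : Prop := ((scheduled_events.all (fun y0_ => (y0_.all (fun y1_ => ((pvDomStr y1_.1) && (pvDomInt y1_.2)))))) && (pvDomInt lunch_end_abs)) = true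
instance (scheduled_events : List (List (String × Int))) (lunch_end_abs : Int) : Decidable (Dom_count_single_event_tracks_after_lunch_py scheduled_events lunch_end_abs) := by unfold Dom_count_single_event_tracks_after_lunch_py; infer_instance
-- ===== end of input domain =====

-- B replaces A's dict grouping by partition refinement: no dictionary is built; a work list of
-- (track, event) pairs is repeatedly split on the first remaining track (objective: alternative).

-- ===== PORT A =====
-- events are Python dicts str->object, modelled as association lists; event["k"] is a
-- first-match lookup (PySem.Dict.get?); none = KeyError, excluded by Pre_ below.
def count_single_event_tracks_after_lunch_py (scheduled_events : List (List (String × Int))) (lunch_end_abs : Int) : Int :=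
  let events_by_track : PySem.Dict Int (List (List (String × Int))) :=
    scheduled_events.foldl (fun d event =>
      match PySem.Dict.get? (PySem.Dict.mk event) "track" with
      | none => d          -- KeyError: outside Pre_
      | some t => d.modify t [] (fun g => g ++ [event]))   -- setdefault(t, []).append(event)
      PySem.Dict.empty
  events_by_track.values.foldl (fun acc track_events =>
    if (track_events.length == 1 &&
        (match PySem.List.pyGet? track_events 0 with
         | none => false
         | some e0 =>
           match PySem.Dict.get? (PySem.Dict.mk e0) "start_min" with
           | none => false   -- KeyError: outside Pre_
           | some s => decide (s ≥ lunch_end_abs))) then acc + 1 else acc) 0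

-- ===== PORT B =====
-- the singleton test of Source B: len(same) == 1 and int(same[0]["start_min"]) >= L
def pvCond (L : Int) (e : List (String × Int)) : Bool :=
  match PySem.Dict.get? (PySem.Dict.mk e) "start_min" with
  | none => false   -- KeyError: outside Pre_
  | some s => decide (s ≥ L)
def pvOk (L : Int) (g : List (List (String × Int))) : Bool :=
  (g.length == 1) && (match PySem.List.pyGet? g 0 with | none => false | some e0 => pvCond L e0)

-- the while loop of Source B: peel off all pairs carrying the first remaining track, test the
-- peeled group, continue on the rest (structural recursion on the shrinking work list)
def pvGo (L : Int) (ps : List (Int × List (String × Int))) : Int :=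
  match ps with
  | [] => 0
  | p :: rest =>
    let same := ((p :: rest).filter (fun q => q.1 == p.1)).map Prod.snd
    (if pvOk L same then 1 else 0)
    + pvGo L ((p :: rest).filter (fun q => !(q.1 == p.1)))
termination_by ps.length
decreasing_by
  simp only [List.filter_cons, beq_self_eq_true, Bool.not_true, List.length_cons]
  exact Nat.lt_succ_of_le (List.length_filter_le _ _)

def count_single_event_tracks_after_lunch_py_alt (scheduled_events : List (List (String × Int))) (lunch_end_abs : Int) : Int :=
  -- pairs = [(int(e["track"]), e) for e in scheduled_events]; missing "track" = KeyError, outside Pre_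
  pvGo lunch_end_abs
    (scheduled_events.filterMap (fun e =>
      (PySem.Dict.get? (PySem.Dict.mk e) "track").map (fun t => (t, e))))

-- ===== PRECONDITION & SPEC =====
-- Pre_ excludes exactly the inputs on which the Python raises KeyError: an event without a
-- "track" key, or an event that is alone on its track but has no "start_min" key.
def Pre_count_single_event_tracks_after_lunch_py (scheduled_events : List (List (String × Int))) (lunch_end_abs : Int) : Prop :=
  ∀ e ∈ scheduled_events,
    (PySem.Dict.get? (PySem.Dict.mk e) "track").isSome = true ∧
    (scheduled_events.countP
        (fun e' => PySem.Dict.get? (PySem.Dict.mk e') "track" == PySem.Dict.get? (PySem.Dict.mk e) "track") = 1 →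
      (PySem.Dict.get? (PySem.Dict.mk e) "start_min").isSome = true)
instance (scheduled_events : List (List (String × Int))) (lunch_end_abs : Int) : Decidable (Pre_count_single_event_tracks_after_lunch_py scheduled_events lunch_end_abs) := by unfold Pre_count_single_event_tracks_after_lunch_py; infer_instance

def pvWitness_count_single_event_tracks_after_lunch_py : (List (List (String × Int))) × Int :=
  ([[("track", 1), ("start_min", 500)], [("track", 2)], [("track", 2)]], 480)

def Spec_count_single_event_tracks_after_lunch_py (scheduled_events : List (List (String × Int))) (lunch_end_abs : Int) (out : Int) : Prop := out = count_single_event_tracks_after_lunch_py_alt scheduled_events lunch_end_abs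
instance (scheduled_events : List (List (String × Int))) (lunch_end_abs : Int) (out : Int) : Decidable (Spec_count_single_event_tracks_after_lunch_py scheduled_events lunch_end_abs out) := by unfold Spec_count_single_event_tracks_after_lunch_py; infer_instance

-- ===== CLAIM (what is proved, stated in full; the proofs are below) =====
def Claim_equal_count_single_event_tracks_after_lunch_py : Prop := ∀ (scheduled_events : List (List (String × Int))) (lunch_end_abs : Int), Dom_count_single_event_tracks_after_lunch_py scheduled_events lunch_end_abs → Pre_count_single_event_tracks_after_lunch_py scheduled_events lunch_end_abs → Spec_count_single_event_tracks_after_lunch_py scheduled_events lunch_end_abs (count_single_event_tracks_after_lunch_py scheduled_events lunch_end_abs)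

-- ===== LEMMAS AND PROOFS =====

theorem add_cons_ne (s : List Int) (a x : Int) (hne : x ≠ a) :
    PySem.Set.add (a :: s) x = a :: PySem.Set.add s x := by
  simp [PySem.Set.add, PySem.Set.contains, hne]
  split <;> simp

theorem foldl_add_cons (l : List Int) (a : Int) (h : ∀ x ∈ l, x ≠ a) :
    ∀ s : List Int, l.foldl PySem.Set.add (a :: s) = a :: l.foldl PySem.Set.add s := by
  induction l with
  | nil => intro s; rfl
  | cons x t ih =>
    intro s
    have hx : x ≠ a := h x (by simp)
    simp only [List.foldl_cons, add_cons_ne s a x hx]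
    exact ih (fun y hy => h y (by simp [hy])) _

theorem foldl_add_filter_mem (l : List Int) (a : Int) :
    ∀ s : List Int, a ∈ s →
      l.foldl PySem.Set.add s = (l.filter (fun x => !(x == a))).foldl PySem.Set.add s := by
  induction l with
  | nil => intro s _; rfl
  | cons x t ih =>
    intro s hs
    by_cases hx : x = a
    · subst hx
      have : PySem.Set.add s x = s := by
        simp [PySem.Set.add, PySem.Set.contains, hs]
      simp [this, ih s hs]
    · have hmem : a ∈ PySem.Set.add s x := by
        simp [PySem.Set.add]; split <;> simp [hs]
      simp [hx, ih _ hmem]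

theorem ofList_cons_filter (a : Int) (l : List Int) :
    PySem.Set.ofList (a :: l) = a :: PySem.Set.ofList (l.filter (fun x => !(x == a))) := by
  have h1 : PySem.Set.ofList (a :: l) = l.foldl PySem.Set.add [a] := by
    simp [PySem.Set.ofList_eq_foldl, PySem.Set.add, PySem.Set.contains]
  rw [h1, foldl_add_filter_mem l a [a] (by simp)]
  have := foldl_add_cons (l.filter (fun x => !(x == a))) a (by
    intro x hx; simp at hx; exact fun he => by simp [he] at hx) ([] : List Int)
  rw [this]; rfl

def pgroup (L : Int) (ps : List (Int × List (String × Int))) (t : Int) : Bool :=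
  pvOk L ((ps.filter (fun p => p.1 == t)).map Prod.snd)

def pvTr (e : List (String × Int)) : Option Int := PySem.Dict.get? (PySem.Dict.mk e) "track"
def pvPs (evs : List (List (String × Int))) : List (Int × List (String × Int)) :=
  evs.filterMap (fun e => (pvTr e).map (fun t => (t, e)))

-- B's partition-refinement loop counts exactly the distinct tracks whose group is a
-- qualifying singleton
theorem pvGo_eq (L : Int) :
    ∀ n (ps : List (Int × List (String × Int))), ps.length ≤ n →
      pvGo L ps = (((PySem.Set.ofList (ps.map Prod.fst)).countP (pgroup L ps) : Nat) : Int) := by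
  intro n
  induction n with
  | zero =>
    intro ps h
    match ps with
    | [] => rw [pvGo]; simp [PySem.Set.ofList_eq_foldl]
    | p :: rest => simp at h
  | succ n ih =>
    intro ps hlen
    match ps with
    | [] => rw [pvGo]; simp [PySem.Set.ofList_eq_foldl]
    | p0 :: rest =>
      set t0 := p0.1 with ht0
      set rest' := rest.filter (fun q => !(q.1 == t0)) with hrest'
      have hrest'' : (p0 :: rest).filter (fun q => !(q.1 == t0)) = rest' := by
        rw [List.filter_cons_of_neg (by simp [← ht0]), hrest']
      have hrest'ne : ∀ q ∈ rest', q.1 ≠ t0 := by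
        intro q hq
        have := List.of_mem_filter hq
        simpa using this
      have hlen' : rest'.length ≤ n := by
        have h1 : rest'.length ≤ rest.length := by
          rw [hrest']; exact List.length_filter_le _ _
        simp only [List.length_cons] at hlen
        omega
      -- unfold one step of pvGo
      have hstep : pvGo L (p0 :: rest)
          = (if pgroup L (p0 :: rest) t0 then 1 else 0) + pvGo L rest' := by
        rw [pvGo, hrest'']
        simp only [pgroup, ht0]
      -- the groups of any track in rest' agree between (p0 :: rest) and rest'
      have hfilter_eq : ∀ t : Int, t ≠ t0 →
          (p0 :: rest).filter (fun q => q.1 == t) = rest'.filter (fun q => q.1 == t) := by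
        intro t ht
        rw [hrest', List.filter_filter]
        rw [List.filter_cons_of_neg (by simp [← ht0, Ne.symm ht])]
        apply List.filter_congr
        intro q _
        by_cases h : q.1 = t
        · simp [h, ht]
        · simp [h]
      have hpg_eq : ∀ t ∈ PySem.Set.ofList (rest'.map Prod.fst),
          pgroup L (p0 :: rest) t = pgroup L rest' t := by
        intro t htm
        have htr : t ∈ rest'.map Prod.fst := (PySem.Set.mem_ofList _ _).1 htm
        obtain ⟨q, hq, hqt⟩ := List.mem_map.1 htr
        have ht : t ≠ t0 := hqt ▸ hrest'ne q hq
        simp only [pgroup, hfilter_eq t ht]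
      -- RHS decomposition: the distinct tracks of ps are t0 followed by those of rest'
      have hmapfst : (p0 :: rest).map Prod.fst = t0 :: rest.map Prod.fst := by simp [← ht0]
      have hfilterfst : (rest.map Prod.fst).filter (fun x => !(x == t0)) = rest'.map Prod.fst := by
        rw [List.filter_map, hrest']; rfl
      have hRHS : PySem.Set.ofList ((p0 :: rest).map Prod.fst)
          = t0 :: PySem.Set.ofList (rest'.map Prod.fst) := by
        rw [hmapfst, ofList_cons_filter, hfilterfst]
      have hpgcongr : (PySem.Set.ofList (rest'.map Prod.fst)).countP (pgroup L (p0 :: rest))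
          = (PySem.Set.ofList (rest'.map Prod.fst)).countP (pgroup L rest') :=
        List.countP_congr (fun t ht => by rw [hpg_eq t ht])
      rw [hstep, ih rest' hlen', hRHS, List.countP_cons, hpgcongr]
      by_cases hc : pgroup L (p0 :: rest) t0 = true
      · simp [hc]; ring
      · simp [hc]

-- A's grouping loop in terms of the (track, event) pairs of the tracked events
theorem red_groups (evs : List (List (String × Int))) :
    ∀ d : PySem.Dict Int (List (List (String × Int))),
      evs.foldl (fun d event =>
        match PySem.Dict.get? (PySem.Dict.mk event) "track" with
        | none => d
        | some t => d.modify t [] (fun g => g ++ [event])) d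
      = (pvPs evs).foldl (fun d p => d.modify p.1 [] (fun g => g ++ [p.2])) d := by
  induction evs with
  | nil => intro d; rfl
  | cons e rest ih =>
    intro d
    simp only [List.foldl_cons, pvPs, List.filterMap_cons]
    cases h : pvTr e with
    | none => simp only [pvTr] at h; simp [h, ih, pvPs]
    | some t => simp only [pvTr] at h; simp [h, ih, pvPs]

theorem pv_ports_eq (evs : List (List (String × Int))) (L : Int) :
    count_single_event_tracks_after_lunch_py evs L = count_single_event_tracks_after_lunch_py_alt evs L := by
  unfold count_single_event_tracks_after_lunch_py count_single_event_tracks_after_lunch_py_alt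
  dsimp only
  rw [red_groups]
  have hps : evs.filterMap (fun e =>
      (PySem.Dict.get? (PySem.Dict.mk e) "track").map (fun t => (t, e))) = pvPs evs := rfl
  rw [hps]
  set ps := pvPs evs with hpsdef
  set ks := ps.map Prod.fst with hks
  set gd := ps.foldl (fun d p => d.modify p.1 [] (fun g => g ++ [p.2])) PySem.Dict.empty with hgd
  -- A side: reduce to a countP over the distinct tracks
  have hkeys : gd.keys = PySem.Set.ofList ks := by
    rw [hgd, PySem.Dict.keys_foldl_modify_key ps Prod.fst [] (fun _ p => fun g => g ++ [p.2])]
    simp [PySem.Dict.keys_empty, PySem.Set.update, PySem.Set.ofList_eq_foldl, hks]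
  have hnodup : gd.keys.Nodup := by
    apply PySem.Dict.nodup_keys_foldl_modify_key ps Prod.fst [] (fun _ p => fun g => g ++ [p.2])
    simp [PySem.Dict.keys_empty]
  have hgetD : ∀ t : Int, gd.getD t [] = (ps.filter (fun p => p.1 == t)).map Prod.snd := by
    intro t
    rw [hgd, PySem.Dict.getD_foldl_modify_append]
    simp
  have hvals : gd.values = (PySem.Set.ofList ks).map
      (fun t => (ps.filter (fun p => p.1 == t)).map Prod.snd) := by
    rw [PySem.Dict.values_eq_map_keys gd hnodup [], hkeys]
    exact List.map_congr_left (fun t _ => hgetD t)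
  rw [hvals, PySem.List.foldl_if_add_one, List.countP_map]
  -- B side: the partition-refinement loop computes the same countP
  rw [pvGo_eq L ps.length ps le_rfl]
  simp only [zero_add, ← hks]
  congr 1

-- ===== VERDICT (by name: the statement is the Claim_ definition above) =====
theorem count_single_event_tracks_after_lunch_py_spec : Claim_equal_count_single_event_tracks_after_lunch_py := by
  intro scheduled_events lunch_end_abs _ _
  unfold Spec_count_single_event_tracks_after_lunch_py
  exact pv_ports_eq scheduled_events lunch_end_abs
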